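-- pv_equiv track=rewrite | github.com/cadusouza2001/somando_dominos | domino/domino.py | find_with_removal
-- ===== SOURCE A (Python) =====
-- import itertools
--
-- def sum_side(set_, side):
--     return sum([i[side] for i in set_])
--
-- def turn(domino):
--     return [domino[1] , domino[0]]
--
-- def generate_keys(n):
--     half = int((2**n)/2)
--     return list(itertools.product([0, 1], repeat=n))[:half]
--
-- def arrange(set_, key):
--     arranged = []
--     set_order = [(set_[i],key[i]) for i in range(len(set_))]
--     for i,j in set_order:
--         if j == 1:
--             arranged += [turn(i)]
--         else:
--             arranged += [i]
--     return arranged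
--
-- def equal_sums(set_):
--     sum_up = sum_side(set_, 0)
--     sum_dn = sum_side(set_, 1)
--     if sum_up == sum_dn:
--         return True
--     else:
--         return False
--
-- def remove(set_, index):
--     new_set = [i for i in set_]
--     new_set.pop(index)
--     return new_set
--
-- def find_arrangement(set_):
--     for key in generate_keys(len(set_)):
--         arrangement = arrange(set_, key)
--         if equal_sums(arrangement):
--             return (sum_side(arrangement, 0) , None)
--     return None
--
-- def find_with_removal(set_):
--     biggest_sum = -1
--     removed = None
--     for i in range(len(set_)):
--         arrangement = find_arrangement(remove(set_, i))
--         if arrangement != None :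
--             actual_sum = arrangement[0]
--             if actual_sum > biggest_sum:
--                 biggest_sum = arrangement[0]
--                 removed = [set_[i][0] , set_[i][1]]
--     return (biggest_sum, removed)
-- ===== SOURCE B (Python) =====
-- def find_with_removal(set_):
--     best = -1
--     removed = None
--     for i, dom in enumerate(set_):
--         rest = set_[:i] + set_[i + 1:]
--         sums = {0}
--         for d in rest:
--             diff = d[0] - d[1]
--             sums = {s + diff for s in sums} | {s - diff for s in sums}
--         if 0 in sums:
--             half = sum(d[0] + d[1] for d in rest) // 2
--             if half > best:
--                 best = half
--                 removed = [dom[0], dom[1]]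
--     return (best, removed)
-- ===== Notes on version B (the rewrite author's own statement) =====
-- stated objective: faster
-- what changed: Per removal, B decides flip-feasibility with a set-based subset-sum DP over the achievable signed sums of the dominoes' top-bottom differences and computes the split value as half the remaining total, instead of materialising all 2^(n-1) flip patterns and re-arranging and re-summing the whole set for each pattern.
-- intended difference: On one-domino inputs A returns (-1, None) because generate_keys(0) yields no key for the empty remainder, while B returns (0, that domino): removing the only domino leaves the empty set, which splits into two equal empty sums of 0, the intended value. — e.g. on find_with_removal([[1, 2]]): A returns (-1, none), B returns (0, some [1, 2])
-- outside the precondition, e.g. on find_with_removal([[5]]): A returns (-1, None), B raises IndexError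
import Mathlib
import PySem

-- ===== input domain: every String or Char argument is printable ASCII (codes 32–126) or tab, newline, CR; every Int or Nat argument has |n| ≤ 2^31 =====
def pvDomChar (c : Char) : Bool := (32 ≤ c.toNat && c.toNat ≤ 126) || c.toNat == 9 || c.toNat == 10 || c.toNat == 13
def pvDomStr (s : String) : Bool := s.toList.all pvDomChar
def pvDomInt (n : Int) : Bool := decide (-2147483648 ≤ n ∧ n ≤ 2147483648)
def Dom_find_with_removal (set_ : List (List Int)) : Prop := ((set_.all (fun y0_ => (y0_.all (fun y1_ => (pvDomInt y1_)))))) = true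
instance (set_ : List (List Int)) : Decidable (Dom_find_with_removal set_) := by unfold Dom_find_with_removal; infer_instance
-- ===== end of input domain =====

-- B replaces the per-removal enumeration of all 2^(n-1) flip patterns by a set-based
-- subset-sum DP over achievable signed difference sums (objective: faster).

-- ===== PORT A =====
def pv_sum_side (set_ : List (List Int)) (side : Nat) : Int :=
  (set_.map (fun i => i.getD side 0)).sum

def pv_turn (domino : List Int) : List Int := [domino.getD 1 0, domino.getD 0 0]

-- itertools.product([0, 1], repeat = n), in lexicographic order
def pv_product01 : Nat → List (List Int)
  | 0 => [[]]
  | n + 1 => ([0, 1] : List Int).flatMap (fun b => (pv_product01 n).map (fun k => b :: k))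

def pv_generate_keys (n : Nat) : List (List Int) := (pv_product01 n).take (2 ^ n / 2)

def pv_arrange (set_ : List (List Int)) (key : List Int) : List (List Int) :=
  let set_order := (List.range set_.length).map (fun i => (set_.getD i [], key.getD i 0))
  set_order.foldl
    (fun arranged ij => if ij.2 == 1 then arranged ++ [pv_turn ij.1] else arranged ++ [ij.1]) []

def pv_equal_sums (set_ : List (List Int)) : Bool := pv_sum_side set_ 0 == pv_sum_side set_ 1

def pv_remove (set_ : List (List Int)) (index : Nat) : List (List Int) := set_.eraseIdx index

def pv_find_arrangement_go (set_ : List (List Int)) : List (List Int) → Option (Int × Option (List Int))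
  | [] => none
  | key :: keys =>
    let arrangement := pv_arrange set_ key
    if pv_equal_sums arrangement then some (pv_sum_side arrangement 0, none)
    else pv_find_arrangement_go set_ keys

def pv_find_arrangement (set_ : List (List Int)) : Option (Int × Option (List Int)) :=
  pv_find_arrangement_go set_ (pv_generate_keys set_.length)

def find_with_removal (set_ : List (List Int)) : Int × Option (List Int) :=
  (List.range set_.length).foldl
    (fun st i =>
      match pv_find_arrangement (pv_remove set_ i) with
      | some arrangement =>
        if arrangement.1 > st.1 then
          (arrangement.1, some [(set_.getD i []).getD 0 0, (set_.getD i []).getD 1 0])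
        else st
      | none => st)
    (-1, none)

-- ===== PORT B =====
-- sums = {s + diff for s in sums} | {s - diff for s in sums}
def pvB_dp_step (sums : PySem.Set Int) (d : List Int) : PySem.Set Int :=
  let diff := d.getD 0 0 - d.getD 1 0
  PySem.Set.union (PySem.Set.ofList (sums.map (fun s => s + diff))) (sums.map (fun s => s - diff))

def find_with_removal_alt (set_ : List (List Int)) : Int × Option (List Int) :=
  (PySem.List.enumerate set_).foldl
    (fun st p =>
      let rest := PySem.List.slice set_ none (some p.1) ++ PySem.List.slice set_ (some (p.1 + 1)) none
      let sums := rest.foldl pvB_dp_step (PySem.Set.ofList [0])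
      if PySem.Set.contains sums 0 then
        let half := PySem.Int.floordiv ((rest.map (fun d => d.getD 0 0 + d.getD 1 0)).sum) 2
        if half > st.1 then (half, some [p.2.getD 0 0, p.2.getD 1 0]) else st
      else st)
    (-1, none)

-- ===== PRECONDITION & SPEC =====
-- Pre_ excludes inputs containing a domino with fewer than two values: on those A raises
-- IndexError (except when such a domino is the sole element, where B's natural indexing raises instead).
def Pre_find_with_removal (set_ : List (List Int)) : Prop := ∀ d ∈ set_, 2 ≤ d.length
instance (set_ : List (List Int)) : Decidable (Pre_find_with_removal set_) := by
  unfold Pre_find_with_removal; infer_instance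

def pvWitness_find_with_removal : List (List Int) := [[1, 2], [3, 4]]

-- On a one-domino input A returns (-1, None) because generate_keys(0) yields no key for the empty
-- remainder, while B returns (0, that domino): the empty remainder splits into two equal (empty) sums
-- of 0, which is the intended value.
def D_find_with_removal (set_ : List (List Int)) : Prop := set_.length = 1
instance (set_ : List (List Int)) : Decidable (D_find_with_removal set_) := by
  unfold D_find_with_removal; infer_instance

def Spec_find_with_removal (set_ : List (List Int)) (out : Int × Option (List Int)) : Prop :=
  ¬ D_find_with_removal set_ → out = find_with_removal_alt set_
instance (set_ : List (List Int)) (out : Int × Option (List Int)) : Decidable (Spec_find_with_removal set_ out) := by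
  unfold Spec_find_with_removal; infer_instance

def pvDiffWitness_find_with_removal : List (List Int) := [[1, 2]]
def pvDiffWitnessOut_find_with_removal : (Int × Option (List Int)) × (Int × Option (List Int)) :=
  ((-1, none), (0, some [1, 2]))

-- ===== CLAIM (what is proved, stated in full; the proofs are below) =====
def Claim_unchanged_find_with_removal : Prop := ∀ (set_ : List (List Int)), Dom_find_with_removal set_ → Pre_find_with_removal set_ → Spec_find_with_removal set_ (find_with_removal set_)
def Claim_changed_find_with_removal : Prop := Dom_find_with_removal (pvDiffWitness_find_with_removal) ∧ Pre_find_with_removal (pvDiffWitness_find_with_removal) ∧ D_find_with_removal (pvDiffWitness_find_with_removal) ∧ find_with_removal (pvDiffWitness_find_with_removal) = pvDiffWitnessOut_find_with_removal.1 ∧ find_with_removal_alt (pvDiffWitness_find_with_removal) = pvDiffWitnessOut_find_with_removal.2 ∧ pvDiffWitnessOut_find_with_removal.1 ≠ pvDiffWitnessOut_find_with_removal.2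
def Claim_exact_find_with_removal : Prop := ∀ (set_ : List (List Int)), Dom_find_with_removal set_ → Pre_find_with_removal set_ → D_find_with_removal set_ → find_with_removal set_ ≠ find_with_removal_alt set_

-- ===== LEMMAS AND PROOFS =====

-- s is reachable as a ±-signed sum of ds
def pvReach : List Int → Int → Prop
  | [], s => s = 0
  | d :: ds, s => pvReach ds (s - d) ∨ pvReach ds (s + d)

def pvDiffs (L : List (List Int)) : List Int := L.map (fun d => d.getD 0 0 - d.getD 1 0)
def pvTotal (L : List (List Int)) : Int := (L.map (fun d => d.getD 0 0 + d.getD 1 0)).sum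
def pvHalf (L : List (List Int)) : Int := PySem.Int.floordiv (pvTotal L) 2
def pvFlip : List Int → Int → List Int := fun d b => if b == (1 : Int) then pv_turn d else d
def pvDSz (L : List (List Int)) (k : List Int) : Int :=
  (List.zipWith (fun d b => if b == (1 : Int) then d.getD 1 0 - d.getD 0 0 else d.getD 0 0 - d.getD 1 0) L k).sum

lemma pvReach_neg (ds : List Int) : ∀ s : Int, pvReach ds s ↔ pvReach ds (-s) := by
  induction ds with
  | nil => intro s; simp only [pvReach]; omega
  | cons d ds ih =>
    intro s
    simp only [pvReach]
    rw [ih (s - d), ih (s + d), show -(s - d) = -s + d by ring, show -(s + d) = -s - d by ring,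
      or_comm]

lemma pvB_mem_foldl (rest : List (List Int)) : ∀ (S : List Int) (x : Int),
    x ∈ rest.foldl pvB_dp_step S ↔ ∃ t ∈ S, pvReach (pvDiffs rest) (x - t) := by
  induction rest with
  | nil =>
    intro S x
    simp only [List.foldl_nil, pvDiffs, List.map_nil, pvReach]
    constructor
    · exact fun h => ⟨x, h, by ring⟩
    · rintro ⟨t, ht, he⟩
      have : x = t := by omega
      rwa [this]
  | cons d rest ih =>
    intro S x
    rw [List.foldl_cons, ih]
    simp only [pvDiffs, List.map_cons, pvReach]
    constructor
    · rintro ⟨t, ht, he⟩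
      rcases (PySem.Set.mem_union _ _ t).mp ht with h | h
      · rcases List.mem_map.mp ((PySem.Set.mem_ofList _ t).mp h) with ⟨u, hu, rfl⟩
        refine ⟨u, hu, Or.inl ?_⟩
        rw [show x - u - (d.getD 0 0 - d.getD 1 0) = x - (u + (d.getD 0 0 - d.getD 1 0)) from by ring]
        exact he
      · rcases List.mem_map.mp h with ⟨u, hu, rfl⟩
        refine ⟨u, hu, Or.inr ?_⟩
        rw [show x - u + (d.getD 0 0 - d.getD 1 0) = x - (u - (d.getD 0 0 - d.getD 1 0)) from by ring]
        exact he
    · rintro ⟨u, hu, he | he⟩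
      · refine ⟨u + (d.getD 0 0 - d.getD 1 0), ?_, ?_⟩
        swap
        · rw [show x - (u + (d.getD 0 0 - d.getD 1 0)) = x - u - (d.getD 0 0 - d.getD 1 0) from by ring]
          exact he
        exact (PySem.Set.mem_union _ _ _).mpr
          (Or.inl ((PySem.Set.mem_ofList _ _).mpr (List.mem_map.mpr ⟨u, hu, rfl⟩)))
      · refine ⟨u - (d.getD 0 0 - d.getD 1 0), ?_, ?_⟩
        swap
        · rw [show x - (u - (d.getD 0 0 - d.getD 1 0)) = x - u + (d.getD 0 0 - d.getD 1 0) from by ring]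
          exact he
        · exact (PySem.Set.mem_union _ _ _).mpr (Or.inr (List.mem_map.mpr ⟨u, hu, rfl⟩))

lemma pv_zipWith_eq_map_zip {α β γ : Type} (g : α → β → γ) (s : List α) (k : List β) :
    List.zipWith g s k = (s.zip k).map (fun p => g p.1 p.2) := by
  induction s generalizing k with
  | nil => simp
  | cons a s ih => cases k <;> simp [ih]

lemma pv_set_order_eq_zip (s : List (List Int)) (k : List Int) (h : k.length = s.length) :
    (List.range s.length).map (fun i => (s.getD i [], k.getD i 0)) = s.zip k := by
  apply List.ext_getElem
  · simp [h]
  · intro i h1 h2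
    have hi : i < s.length := by simpa using h1
    have hik : i < k.length := by omega
    simp [List.getElem_zip, List.getElem?_eq_getElem hi, List.getElem?_eq_getElem hik]

lemma pv_arrange_eq (s : List (List Int)) (k : List Int) (h : k.length = s.length) :
    pv_arrange s k = List.zipWith pvFlip s k := by
  unfold pv_arrange
  rw [pv_set_order_eq_zip s k h]
  have hstep : (fun (arranged : List (List Int)) (ij : List Int × Int) =>
      if ij.2 == 1 then arranged ++ [pv_turn ij.1] else arranged ++ [ij.1]) =
      fun arranged ij => arranged ++ [pvFlip ij.1 ij.2] := by
    funext arranged ij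
    by_cases hb : ij.2 == 1 <;> simp [pvFlip, hb]
  rw [hstep, PySem.List.foldl_append_singleton_eq_map, List.nil_append,
    pv_zipWith_eq_map_zip]

lemma pv_sum_sub (s : List (List Int)) : ∀ k : List Int,
    pv_sum_side (List.zipWith pvFlip s k) 0 - pv_sum_side (List.zipWith pvFlip s k) 1 = pvDSz s k := by
  induction s with
  | nil => intro k; simp [pv_sum_side, pvDSz]
  | cons d s ih =>
    intro k
    cases k with
    | nil => simp [pv_sum_side, pvDSz]
    | cons b k =>
      have := ih k
      simp only [List.zipWith_cons_cons, pv_sum_side, List.map_cons, List.sum_cons, pvDSz,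
        pvFlip] at *
      by_cases hb : b == (1 : Int) <;> simp [hb, pv_turn] at * <;> omega

lemma pv_sum_add (s : List (List Int)) : ∀ k : List Int, k.length = s.length →
    pv_sum_side (List.zipWith pvFlip s k) 0 + pv_sum_side (List.zipWith pvFlip s k) 1 = pvTotal s := by
  induction s with
  | nil => intro k _; simp [pv_sum_side, pvTotal]
  | cons d s ih =>
    intro k hk
    cases k with
    | nil => simp at hk
    | cons b k =>
      have hk' : k.length = s.length := by simpa using hk
      have := ih k hk'
      simp only [List.zipWith_cons_cons, pv_sum_side, List.map_cons, List.sum_cons, pvTotal,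
        pvFlip] at *
      by_cases hb : b == (1 : Int) <;> simp [hb, pv_turn] at * <;> omega

lemma pv_product01_succ (n : Nat) :
    pv_product01 (n + 1) = (pv_product01 n).map (fun k => (0 : Int) :: k) ++
      (pv_product01 n).map (fun k => (1 : Int) :: k) := by
  simp [pv_product01]

lemma pv_length_product01 (n : Nat) : (pv_product01 n).length = 2 ^ n := by
  induction n with
  | zero => simp [pv_product01]
  | succ n ih => rw [pv_product01_succ]; simp [ih]; ring

lemma pv_mem_product01_length (n : Nat) : ∀ k ∈ pv_product01 n, k.length = n := by
  induction n with
  | zero => intro k hk; simp [pv_product01] at hk; simp [hk]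
  | succ n ih =>
    intro k hk
    rw [pv_product01_succ] at hk
    rcases List.mem_append.mp hk with h | h <;>
      · rcases List.mem_map.mp h with ⟨k', hk', rfl⟩
        simp [ih k' hk']

lemma pv_generate_keys_succ (n : Nat) :
    pv_generate_keys (n + 1) = (pv_product01 n).map (fun k => (0 : Int) :: k) := by
  unfold pv_generate_keys
  rw [pv_product01_succ]
  have hlen : ((pv_product01 n).map (fun k => (0 : Int) :: k)).length = 2 ^ n := by
    simp [pv_length_product01]
  have hpow : 2 ^ (n + 1) / 2 = 2 ^ n := by
    rw [pow_succ]; exact Nat.mul_div_cancel _ (by norm_num)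
  rw [hpow, ← hlen, List.take_left]

lemma pv_exists_product01 (L : List (List Int)) : ∀ s : Int,
    (∃ k ∈ pv_product01 L.length, pvDSz L k = s) ↔ pvReach (pvDiffs L) s := by
  have h0 : ∀ (d : List Int) (L : List (List Int)) (k' : List Int),
      pvDSz (d :: L) ((0 : Int) :: k') = (d.getD 0 0 - d.getD 1 0) + pvDSz L k' := by
    intro d L k'; simp [pvDSz]
  have h1 : ∀ (d : List Int) (L : List (List Int)) (k' : List Int),
      pvDSz (d :: L) ((1 : Int) :: k') = (d.getD 1 0 - d.getD 0 0) + pvDSz L k' := by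
    intro d L k'; simp [pvDSz]
  induction L with
  | nil =>
    intro s
    simp only [List.length_nil, pv_product01, List.mem_singleton, pvDiffs, List.map_nil, pvReach]
    constructor
    · rintro ⟨k, rfl, hDS⟩
      simp only [pvDSz, List.zipWith_nil_left, List.sum_nil] at hDS
      omega
    · intro h
      exact ⟨[], rfl, by simp [pvDSz]; omega⟩
  | cons d L ih =>
    intro s
    simp only [List.length_cons, pv_product01_succ, List.mem_append, List.mem_map, pvDiffs,
      List.map_cons, pvReach]
    constructor
    · rintro ⟨k, hk | hk, hDS⟩ <;> rcases hk with ⟨k', hk', rfl⟩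
      · rw [h0] at hDS
        exact Or.inl ((ih _).mp ⟨k', hk', by omega⟩)
      · rw [h1] at hDS
        exact Or.inr ((ih _).mp ⟨k', hk', by omega⟩)
    · rintro (h | h)
      · rcases (ih _).mpr h with ⟨k', hk', hDS⟩
        exact ⟨(0 : Int) :: k', Or.inl ⟨k', hk', rfl⟩, by rw [h0]; omega⟩
      · rcases (ih _).mpr h with ⟨k', hk', hDS⟩
        exact ⟨(1 : Int) :: k', Or.inr ⟨k', hk', rfl⟩, by rw [h1]; omega⟩

lemma pv_half_feas (L : List (List Int)) (hL : L ≠ []) :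
    (∃ k ∈ pv_generate_keys L.length, pvDSz L k = 0) ↔ pvReach (pvDiffs L) 0 := by
  rcases L with _ | ⟨d, L'⟩
  · exact absurd rfl hL
  simp only [List.length_cons, pv_generate_keys_succ, List.mem_map, pvDiffs, List.map_cons,
    pvReach]
  have hstep : ∀ k', pvDSz (d :: L') ((0 : Int) :: k') = (d.getD 0 0 - d.getD 1 0) + pvDSz L' k' := by
    intro k'
    simp [pvDSz]
  constructor
  · rintro ⟨k, ⟨k', hk', rfl⟩, hDS⟩
    rw [hstep] at hDS
    have h1 : pvDSz L' k' = 0 - (d.getD 0 0 - d.getD 1 0) := by omega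
    exact Or.inl ((pv_exists_product01 L' _).mp ⟨k', hk', h1⟩)
  · rintro (h | h)
    · rcases (pv_exists_product01 L' _).mpr h with ⟨k', hk', hDS⟩
      exact ⟨(0 : Int) :: k', ⟨k', hk', rfl⟩, by rw [hstep]; omega⟩
    · have h' : pvReach (pvDiffs L') (0 - (d.getD 0 0 - d.getD 1 0)) := by
        have := (pvReach_neg (pvDiffs L') (0 + (d.getD 0 0 - d.getD 1 0))).mp h
        convert this using 1; ring
      rcases (pv_exists_product01 L' _).mpr h' with ⟨k', hk', hDS⟩
      exact ⟨(0 : Int) :: k', ⟨k', hk', rfl⟩, by rw [hstep]; omega⟩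

lemma pv_go_spec (L : List (List Int)) : ∀ ks : List (List Int),
    (∀ k ∈ ks, k.length = L.length) →
    pv_find_arrangement_go L ks =
      if ∃ k ∈ ks, pvDSz L k = 0 then some (pvHalf L, none) else none := by
  intro ks
  induction ks with
  | nil => intro _; simp [pv_find_arrangement_go]
  | cons k ks ih =>
    intro hk
    have hlen : k.length = L.length := hk k List.mem_cons_self
    have harr : pv_arrange L k = List.zipWith pvFlip L k := pv_arrange_eq L k hlen
    have hsub := pv_sum_sub L k
    have hadd := pv_sum_add L k hlen
    simp only [pv_find_arrangement_go, harr]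
    by_cases heq : pv_sum_side (List.zipWith pvFlip L k) 0 = pv_sum_side (List.zipWith pvFlip L k) 1
    · have hb : pv_equal_sums (List.zipWith pvFlip L k) = true := by
        simp [pv_equal_sums, heq]
      have hDS : pvDSz L k = 0 := by omega
      have hex : ∃ k' ∈ k :: ks, pvDSz L k' = 0 := ⟨k, List.mem_cons_self, hDS⟩
      rw [hb]
      rw [if_pos rfl, if_pos hex]
      have hhalf : pv_sum_side (List.zipWith pvFlip L k) 0 = pvHalf L := by
        have ht : pvTotal L = 2 * pv_sum_side (List.zipWith pvFlip L k) 0 := by omega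
        rw [pvHalf, ht, PySem.Int.floordiv_eq_ediv_of_pos (by norm_num),
          Int.mul_ediv_cancel_left _ (by norm_num)]
      rw [hhalf]
    · have hb : pv_equal_sums (List.zipWith pvFlip L k) = false := by
        simp [pv_equal_sums, heq]
      have hDS : pvDSz L k ≠ 0 := by omega
      rw [hb]
      rw [if_neg Bool.false_ne_true, ih (fun k' hk' => hk k' (List.mem_cons_of_mem _ hk'))]
      by_cases hex : ∃ k' ∈ ks, pvDSz L k' = 0
      · rw [if_pos hex, if_pos ⟨hex.choose, List.mem_cons_of_mem _ hex.choose_spec.1,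
          hex.choose_spec.2⟩]
      · rw [if_neg hex, if_neg]
        rintro ⟨k', hk', hDS'⟩
        rcases List.mem_cons.mp hk' with rfl | hmem
        · exact hDS hDS'
        · exact hex ⟨k', hmem, hDS'⟩

lemma pv_contains_iff (rest : List (List Int)) :
    PySem.Set.contains (rest.foldl pvB_dp_step (PySem.Set.ofList [0])) 0 = true ↔
      pvReach (pvDiffs rest) 0 := by
  rw [PySem.Set.contains_iff, pvB_mem_foldl]
  constructor
  · rintro ⟨t, ht, hr⟩
    have : t = 0 := by
      have := (PySem.Set.mem_ofList [0] t).mp ht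
      simpa using this
    subst this
    simpa using hr
  · intro h
    exact ⟨0, (PySem.Set.mem_ofList [0] 0).mpr (by simp), by simpa using h⟩

lemma pv_keys_len (L : List (List Int)) (hL : L ≠ []) :
    ∀ k ∈ pv_generate_keys L.length, k.length = L.length := by
  intro k hk
  rcases L with _ | ⟨d, L'⟩
  · exact absurd rfl hL
  simp only [List.length_cons] at hk ⊢
  rw [pv_generate_keys_succ] at hk
  rcases List.mem_map.mp hk with ⟨k', hk', rfl⟩
  simp [pv_mem_product01_length _ k' hk']

lemma pv_find_arrangement_pos (L : List (List Int)) (hL : L ≠ [])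
    (h : pvReach (pvDiffs L) 0) :
    pv_find_arrangement L = some (pvHalf L, none) := by
  unfold pv_find_arrangement
  rw [pv_go_spec L (pv_generate_keys L.length) (pv_keys_len L hL),
    if_pos ((pv_half_feas L hL).mpr h)]

lemma pv_find_arrangement_neg (L : List (List Int)) (hL : L ≠ [])
    (h : ¬ pvReach (pvDiffs L) 0) :
    pv_find_arrangement L = none := by
  unfold pv_find_arrangement
  rw [pv_go_spec L (pv_generate_keys L.length) (pv_keys_len L hL),
    if_neg (fun hex => h ((pv_half_feas L hL).mp hex))]

lemma pv_step_eq (set_ : List (List Int)) (hn : set_.length ≠ 1) :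
    ∀ (st : Int × Option (List Int)) (j : Nat), j < set_.length →
      (match pv_find_arrangement (pv_remove set_ j) with
        | some arrangement =>
          if arrangement.1 > st.1 then
            (arrangement.1, some [(set_.getD j []).getD 0 0, (set_.getD j []).getD 1 0])
          else st
        | none => st) =
      (let rest := PySem.List.slice set_ none (some ((j : Nat) : Int)) ++
          PySem.List.slice set_ (some (((j : Nat) : Int) + 1)) none
        let sums := rest.foldl pvB_dp_step (PySem.Set.ofList [0])
        if PySem.Set.contains sums 0 then
          let half := PySem.Int.floordiv ((rest.map (fun d => d.getD 0 0 + d.getD 1 0)).sum) 2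
          if half > st.1 then
            (half, some [(PySem.List.pyGetD set_ ((j : Nat) : Int) []).getD 0 0,
              (PySem.List.pyGetD set_ ((j : Nat) : Int) []).getD 1 0])
          else st
        else st) := by
  intro st j hj
  have hrest : PySem.List.slice set_ none (some ((j : Nat) : Int)) ++
      PySem.List.slice set_ (some (((j : Nat) : Int) + 1)) none = set_.eraseIdx j := by
    rw [PySem.List.slice_to_natCast, show (((j : Nat) : Int) + 1) = (((j + 1 : Nat)) : Int) by
      push_cast; ring, PySem.List.slice_from_natCast, List.eraseIdx_eq_take_drop_succ]
  have hget : PySem.List.pyGetD set_ ((j : Nat) : Int) [] = set_.getD j [] :=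
    PySem.List.pyGetD_natCast set_ j []
  have hne : set_.eraseIdx j ≠ [] := by
    have : (set_.eraseIdx j).length = set_.length - 1 := by
      rw [List.length_eraseIdx, if_pos hj]
    intro hnil
    rw [hnil] at this
    simp at this
    omega
  simp only [hrest, hget, pv_remove]
  by_cases h : pvReach (pvDiffs (set_.eraseIdx j)) 0
  · rw [pv_find_arrangement_pos _ hne h]
    have hc := (pv_contains_iff (set_.eraseIdx j)).mpr h
    simp only [hc, if_true]
    rfl
  · rw [pv_find_arrangement_neg _ hne h]
    have hc : PySem.Set.contains ((set_.eraseIdx j).foldl pvB_dp_step (PySem.Set.ofList [0])) 0 =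
        false := by
      rw [Bool.eq_false_iff]
      intro hc
      exact h ((pv_contains_iff _).mp hc)
    simp only [hc, Bool.false_eq_true, if_false]

-- ===== VERDICT (by name: the statement is the Claim_ definition above) =====
theorem find_with_removal_spec : Claim_unchanged_find_with_removal := by
  intro set_ _ _
  unfold Spec_find_with_removal D_find_with_removal
  intro hn
  unfold find_with_removal find_with_removal_alt
  rw [PySem.List.enumerate_eq_map_pyRange set_ [],
    show PySem.List.len set_ = ((set_.length : Nat) : Int) from rfl,
    PySem.List.pyRange_zero_natCast, List.map_map, List.foldl_map]
  apply PySem.List.foldl_congr_mem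
  intro st j hj
  have hjlt : j < set_.length := List.mem_range.mp hj
  exact pv_step_eq set_ hn st j hjlt

theorem find_with_removal_changed : Claim_changed_find_with_removal := by
  unfold Claim_changed_find_with_removal; decide

theorem find_with_removal_tight : Claim_exact_find_with_removal := by
  intro set_ _ _ hD
  unfold D_find_with_removal at hD
  rcases List.length_eq_one_iff.mp hD with ⟨d, rfl⟩
  have hA : find_with_removal [d] = (-1, none) := by
    simp [find_with_removal, List.range_succ, pv_remove, pv_find_arrangement,
      pv_generate_keys, pv_product01, pv_find_arrangement_go]
  have hB : (find_with_removal_alt [d]).1 = 0 := by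
    simp [find_with_removal_alt, PySem.List.enumerate,
      PySem.List.slice, PySem.List.clampIdx, PySem.Set.contains, PySem.Set.ofList,
      PySem.Int.floordiv]
  intro hEq
  rw [hA] at hEq
  have : (-1 : Int) = (find_with_removal_alt [d]).1 := congrArg Prod.fst hEq
  rw [hB] at this
  exact absurd this (by norm_num)
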